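-- pv_equiv track=rewrite | github.com/miliar/Code_Jam_Webscraper | Solutions_python/Problem_155/1738.py | solve
-- ===== SOURCE A (Python) =====
-- def solve(p):
--
--     pos = str(p)
--     total = 0
--     friends = 0
--
--     for n in range(len(pos)):
--         num = int(pos[n])
--         if total >= n:
--             total += num
--         elif total < n:
--             diff = n - total
--             friends += diff
--             total += diff + num
--
--     return(friends)
-- ===== SOURCE B (Python) =====
-- def solve(p):
--     def go(digits, n, total):
--         if not digits:
--             return 0
--         return max(n - total, go(digits[1:], n + 1, total + digits[0]))
--     return go([int(c) for c in str(p)], 0, 0)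
-- ===== Notes on version B (the rewrite author's own statement) =====
-- stated objective: alternative
-- what changed: B replaces A's iterative two-branch state machine (total mixed with friends) by a recursive back-to-front computation: the answer is the maximum deficit n - prefix_sum over all digit positions, computed by structural recursion over the digit list with no mutable friends/total interaction.
import Mathlib
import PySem

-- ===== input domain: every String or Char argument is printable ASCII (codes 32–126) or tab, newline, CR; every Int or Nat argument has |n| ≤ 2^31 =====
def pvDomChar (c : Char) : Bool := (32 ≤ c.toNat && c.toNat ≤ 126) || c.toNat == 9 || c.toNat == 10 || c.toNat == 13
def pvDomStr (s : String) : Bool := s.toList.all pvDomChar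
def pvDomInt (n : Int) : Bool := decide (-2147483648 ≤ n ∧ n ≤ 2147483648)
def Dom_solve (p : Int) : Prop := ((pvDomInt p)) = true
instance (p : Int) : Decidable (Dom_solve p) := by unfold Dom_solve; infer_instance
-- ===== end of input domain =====

-- B change: instead of A's iterative state machine that folds friends back into total, B
-- computes the answer recursively as the maximum deficit (position minus digit prefix sum).

-- ===== PORT A =====
-- num = int(pos[n]); under Pre_solve (nonnegative p) every pos[n] is a digit, so ofChars? never returns none; .getD 0 is unreachable there.
def pvNum (pos : List Char) (n : Int) : Int :=
  (PySem.Int.ofChars? [PySem.List.pyGetD pos n ' ']).getD 0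

-- one iteration of A's loop body on the state (total, friends)
def pvStepA (pos : List Char) (s : Int × Int) (n : Int) : Int × Int :=
  let num := pvNum pos n
  if s.1 ≥ n then (s.1 + num, s.2)
  else (s.1 + (n - s.1) + num, s.2 + (n - s.1))

def solve (p : Int) : Int :=
  let pos := PySem.Int.toChars p
  let st := (PySem.List.pyRange 0 pos.length 1).foldl (pvStepA pos) (0, 0)
  st.2

-- ===== PORT B =====
-- int(c) for one character; under Pre_solve every character is a digit
def pvDigit (c : Char) : Int := (PySem.Int.ofChars? [c]).getD 0

-- go(digits, n, total) = max(n - total, go(digits[1:], n + 1, total + digits[0])), 0 on []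
def pvGo : List Int → Int → Int → Int
  | [], _, _ => 0
  | d :: ds, n, t => max (n - t) (pvGo ds (n + 1) (t + d))

def solve_alt (p : Int) : Int :=
  pvGo ((PySem.Int.toChars p).map pvDigit) 0 0

-- ===== PRECONDITION & SPEC =====
-- Python A raises ValueError on negative p (int of the minus sign); so does B's digit comprehension.
def Pre_solve (p : Int) : Prop := 0 ≤ p
instance (p : Int) : Decidable (Pre_solve p) := by unfold Pre_solve; infer_instance
def pvWitness_solve : Int := (19)
def Spec_solve (p : Int) (out : Int) : Prop := out = solve_alt p
instance (p : Int) (out : Int) : Decidable (Spec_solve p out) := by unfold Spec_solve; infer_instance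

-- ===== CLAIM (what is proved, stated in full; the proofs are below) =====
def Claim_equal_solve : Prop := ∀ (p : Int), Dom_solve p → Pre_solve p → Spec_solve p (solve p)

-- ===== LEMMAS AND PROOFS =====

-- Bridge: A's left fold from index a with state (t, f), 0 ≤ f, yields max f (pvGo (suffix digits) a (t - f)).
lemma pv_bridge (pos : List Char) :
    ∀ (suf : List Char) (a : Nat), pos.drop a = suf → ∀ t f : Int, 0 ≤ f →
      ((PySem.List.pyRange a pos.length 1).foldl (pvStepA pos) (t, f)).2
        = max f (pvGo (suf.map pvDigit) a (t - f)) := by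
  intro suf
  induction suf with
  | nil =>
    intro a hdrop t f hf
    have hla : pos.length ≤ a := List.drop_eq_nil_iff.mp hdrop
    have hr : PySem.List.pyRange a pos.length 1 = [] := by
      rw [PySem.List.pyRange_one]
      have : ((pos.length : Int) - (a : Int)).toNat = 0 := by omega
      simp [this]
    rw [hr]
    simp [pvGo]
    omega
  | cons c suf ih =>
    intro a hdrop t f hf
    have ha : a < pos.length := by
      by_contra h
      rw [List.drop_eq_nil_iff.mpr (by omega)] at hdrop
      simp at hdrop
    have hdrop' : pos.drop (a + 1) = suf := by
      have h1 : pos.drop (a + 1) = (pos.drop a).drop 1 := by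
        rw [List.drop_drop]
      rw [h1, hdrop]
      simp
    have hc : pos[a] = c := by
      have : pos.drop a = pos[a] :: pos.drop (a + 1) :=
        List.drop_eq_getElem_cons ha
      rw [hdrop, hdrop'] at this
      exact (List.cons.injEq _ _ _ _ ▸ this).1.symm
    have hnum : pvNum pos a = pvDigit c := by
      unfold pvNum pvDigit
      rw [PySem.List.pyGetD_eq_getElem pos ' ' (by omega) (by exact_mod_cast ha)]
      simp [hc]
    have hcons : PySem.List.pyRange a pos.length 1
        = (a : Int) :: PySem.List.pyRange ((a : Int) + 1) pos.length 1 := by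
      exact PySem.List.pyRange_one_cons (by exact_mod_cast ha)
    rw [hcons]
    simp only [List.foldl_cons, List.map_cons, pvGo]
    have hcast : ((a : Int) + 1) = ((a + 1 : Nat) : Int) := by push_cast; ring
    by_cases h : t ≥ (a : Int)
    · have hstep : pvStepA pos (t, f) (a : Int) = (t + pvDigit c, f) := by
        simp [pvStepA, hnum, h]
      rw [hstep, hcast, ih (a + 1) hdrop' (t + pvDigit c) f hf]
      have he : t + pvDigit c - f = t - f + pvDigit c := by ring
      rw [he]
      push_cast
      omega
    · have hstep : pvStepA pos (t, f) (a : Int)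
          = (t + ((a : Int) - t) + pvDigit c, f + ((a : Int) - t)) := by
        simp [pvStepA, hnum, h]
      rw [hstep, hcast, ih (a + 1) hdrop' _ _ (by omega)]
      have he : t + ((a : Int) - t) + pvDigit c - (f + ((a : Int) - t))
          = t - f + pvDigit c := by ring
      rw [he]
      push_cast
      omega

lemma pv_go_nonneg (ds : List Int) : 0 ≤ pvGo ds 0 0 := by
  cases ds with
  | nil => simp [pvGo]
  | cons d ds => simp [pvGo]

-- ===== VERDICT (by name: the statement is the Claim_ definition above) =====
theorem solve_spec : Claim_equal_solve := by
  intro p _ _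
  unfold Spec_solve solve solve_alt
  have h0 : (PySem.Int.toChars p).drop 0 = PySem.Int.toChars p := List.drop_zero
  have := pv_bridge (PySem.Int.toChars p) (PySem.Int.toChars p) 0 h0 0 0 le_rfl
  simp only [Nat.cast_zero] at this
  rw [this]
  simp only [Int.sub_zero]
  exact max_eq_right (pv_go_nonneg _)
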